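-- pv_equiv track=rewrite | github.com/gmy2013/icse26_failure_refinement | maximum_appearing_duplicate_sum/maximum_appearing_duplicate_sum/main.py | mad_prefix
-- ===== SOURCE A (Python) =====
-- from collections import Counter
-- from typing import List
--
-- def mad_prefix(arr: List[int]) -> List[int]:
--     """Compute the MAD (most frequent element) for each prefix of the array.
--
--     Args:
--         arr: List[int] - The input array.
--
--     Returns:
--         List[int]: List of MADs for each prefix.
--     """
--     freq_counter: Counter = Counter()
--     mad_list: List[int] = []
--     max_freq: int = 0
--     mad_value: int = 0
--
--     for i, val in enumerate(arr):
--         freq_counter[val] += 1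
--         if freq_counter[val] > max_freq or (
--             freq_counter[val] == max_freq and val < mad_value
--         ):
--             max_freq = freq_counter[val]
--             mad_value = val
--         mad_list.append(mad_value)
--     return mad_list
-- ===== SOURCE B (Python) =====
-- from collections import Counter
-- from typing import List
--
-- def mad_prefix(arr: List[int]) -> List[int]:
--     """Compute the MAD (most frequent element, ties to smallest) for each prefix."""
--     counter: Counter = Counter()
--     mads: List[int] = []
--     for val in arr:
--         counter[val] += 1
--         mads.append(min(counter, key=lambda x: (-counter[x], x)))
--     return mads
-- ===== Notes on version B (the rewrite author's own statement) =====
-- stated objective: simpler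
-- what changed: Drops A's incremental max_freq/mad_value state and instead recomputes each prefix's MAD directly as a min over the counter's keys with key (-count, value).
import Mathlib
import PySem

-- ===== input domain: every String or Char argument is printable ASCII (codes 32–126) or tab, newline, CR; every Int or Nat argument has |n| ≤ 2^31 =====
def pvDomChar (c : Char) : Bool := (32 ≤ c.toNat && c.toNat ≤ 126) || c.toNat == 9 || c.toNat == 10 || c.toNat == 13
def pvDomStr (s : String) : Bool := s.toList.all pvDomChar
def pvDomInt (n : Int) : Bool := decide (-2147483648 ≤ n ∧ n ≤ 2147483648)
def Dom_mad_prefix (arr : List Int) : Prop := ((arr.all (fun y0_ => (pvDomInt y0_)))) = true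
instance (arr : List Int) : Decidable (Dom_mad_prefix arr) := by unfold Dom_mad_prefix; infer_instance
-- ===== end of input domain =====

-- B drops A's incremental max_freq/mad_value tracking and recomputes each prefix's
-- MAD as a direct min over the counter's keys with key (-count, value): simpler, not faster.

-- ===== PORT A =====
-- state: (freq_counter, mad_list, (max_freq, mad_value))
def stepA (st : PySem.Dict Int Int × List Int × Int × Int) (iv : Int × Int) :
    PySem.Dict Int Int × List Int × Int × Int :=
  let val := iv.2
  let fc := st.1.modify val 0 (· + 1)          -- freq_counter[val] += 1
  if fc.getD val 0 > st.2.2.1 ∨ (fc.getD val 0 = st.2.2.1 ∧ val < st.2.2.2) then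
    (fc, st.2.1 ++ [val], fc.getD val 0, val)   -- update max_freq, mad_value; append mad_value
  else
    (fc, st.2.1 ++ [st.2.2.2], st.2.2.1, st.2.2.2)

def mad_prefix (arr : List Int) : List Int :=
  ((PySem.List.enumerate arr 0).foldl stepA (PySem.Dict.empty, ([], (0, 0)))).2.1

-- ===== PORT B =====
-- counter[val] += 1 then append min(counter, key=lambda x: (-counter[x], x));
-- the counter is nonempty after the increment, so min? is some and the .getD 0 is unreachable
def stepB (st : PySem.Dict Int Int × List Int) (val : Int) :
    PySem.Dict Int Int × List Int :=
  let c := st.1.modify val 0 (· + 1)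
  (c, st.2 ++ [(PySem.List.min2? c.keys (fun x => -(c.getD x 0)) (fun x => x)).getD 0])

def mad_prefix_alt (arr : List Int) : List Int :=
  (arr.foldl stepB (PySem.Dict.empty, [])).2

-- ===== PRECONDITION & SPEC =====
def Spec_mad_prefix (arr : List Int) (out : List Int) : Prop := out = mad_prefix_alt arr
instance (arr : List Int) (out : List Int) : Decidable (Spec_mad_prefix arr out) := by unfold Spec_mad_prefix; infer_instance

-- ===== CLAIM (what is proved, stated in full; the proofs are below) =====
def Claim_equal_mad_prefix : Prop := ∀ (arr : List Int), Dom_mad_prefix arr → Spec_mad_prefix arr (mad_prefix arr)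

-- ===== LEMMAS AND PROOFS =====

-- stepA only uses the value component of the enumerate pair
def stepA' (st : PySem.Dict Int Int × List Int × Int × Int) (v : Int) :
    PySem.Dict Int Int × List Int × Int × Int := stepA st (0, v)

theorem foldA_enum (xs : List Int) : ∀ (s : Int) (init : PySem.Dict Int Int × List Int × Int × Int),
    (PySem.List.enumerate xs s).foldl stepA init = xs.foldl stepA' init := by
  induction xs with
  | nil => intro s init; simp [PySem.List.enumerate]
  | cons x t ih =>
      intro s init
      simp only [PySem.List.enumerate, List.foldl_cons, ih]
      rfl

-- invariant carried by A's (max_freq, mad_value) after processing prefix l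
def InvA (l : List Int) (mf mv : Int) : Prop :=
  (∀ x : Int, (l.count x : Int) ≤ mf) ∧
  (l ≠ [] → mv ∈ l ∧ (l.count mv : Int) = mf) ∧
  (∀ x ∈ l, (l.count x : Int) = mf → mv ≤ x) ∧
  (l = [] → mf = 0)

theorem min2_aux (k1 : Int → Int) : ∀ (t : List Int) (a m : Int),
    (m ∈ t ∨ a = m) → (k1 m < k1 a ∨ (k1 m = k1 a ∧ m ≤ a)) →
    (∀ y ∈ t, k1 m < k1 y ∨ (k1 m = k1 y ∧ m ≤ y)) →
    PySem.List.min2? (a :: t) k1 (fun x => x) = some m := by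
  intro t
  induction t with
  | nil =>
      intro a m hmem _ _
      rcases hmem with h | h
      · simp at h
      · subst h; rfl
  | cons x t2 ih =>
      intro a m hmem hle hall
      have hstep : PySem.List.min2? (a :: x :: t2) k1 (fun x => x) =
          PySem.List.min2? ((if (decide (k1 x < k1 a) || !decide (k1 a < k1 x) && decide (x < a)) = true then x else a) :: t2) k1 (fun x => x) := by
        simp only [PySem.List.min2?, List.foldl_cons]
        rcases Bool.eq_false_or_eq_true (decide (k1 x < k1 a) || !decide (k1 a < k1 x) && decide (x < a)) with hc | hc <;>
          simp only [hc, if_true, if_false, Bool.false_eq_true]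
      rw [hstep]
      set a' := if (decide (k1 x < k1 a) || !decide (k1 a < k1 x) && decide (x < a)) = true then x else a with ha'
      have hlex : k1 m < k1 x ∨ (k1 m = k1 x ∧ m ≤ x) := hall x (by simp)
      have hle' : k1 m < k1 a' ∨ (k1 m = k1 a' ∧ m ≤ a') := by
        rw [ha']; split
        · exact hlex
        · exact hle
      have hall' : ∀ y ∈ t2, k1 m < k1 y ∨ (k1 m = k1 y ∧ m ≤ y) :=
        fun y hy => hall y (by simp [hy])
      have hmem' : m ∈ t2 ∨ a' = m := by
        rcases hmem with hmt | ham
        · rcases List.mem_cons.mp hmt with hmx | hmt2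
          · -- m = x
            right
            subst hmx
            rw [ha']; split
            · rfl
            · -- ¬ (m beats a): but m ∈ whole list is minimal, and a ≠ m unless equal anyway
              rename_i hnc
              simp only [Bool.or_eq_true, Bool.and_eq_true, Bool.not_eq_true', decide_eq_true_eq, decide_eq_false_iff_not, not_or, not_and, not_lt] at hnc
              rcases hle with h1 | ⟨h2, h3⟩
              · omega
              · omega
          · exact Or.inl hmt2
        · right
          rw [ha']; split
          · rename_i hc
            simp only [Bool.or_eq_true, Bool.and_eq_true, Bool.not_eq_true', decide_eq_true_eq, decide_eq_false_iff_not] at hc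
            subst ham
            rcases hlex with h1 | ⟨h2, h3⟩ <;> rcases hc with h4 | ⟨h5, h6⟩ <;> omega
          · exact ham
      exact ih a' m hmem' hle' hall'

-- Python's min with key (-count, value) returns m when m has the lexicographically least key
theorem min2_eq_some (k1 : Int → Int) (xs : List Int) (m : Int) (hm : m ∈ xs)
    (hmin : ∀ y ∈ xs, k1 m < k1 y ∨ (k1 m = k1 y ∧ m ≤ y)) :
    PySem.List.min2? xs k1 (fun x => x) = some m := by
  match xs, hm with
  | x :: t, hm =>
    have hx : k1 m < k1 x ∨ (k1 m = k1 x ∧ m ≤ x) := hmin x (by simp)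
    have hmem : m ∈ t ∨ x = m := by
      rcases List.mem_cons.mp hm with h | h
      · exact Or.inr h.symm
      · exact Or.inl h
    exact min2_aux k1 t x m hmem hx (fun y hy => hmin y (List.mem_cons_of_mem _ hy))

theorem invA_step (l : List Int) (mf mv v : Int) (h : InvA l mf mv) :
    ((((l.count v : Int) + 1 > mf ∨ ((l.count v : Int) + 1 = mf ∧ v < mv)) →
        InvA (l ++ [v]) ((l.count v : Int) + 1) v) ∧
     ((¬ ((l.count v : Int) + 1 > mf ∨ ((l.count v : Int) + 1 = mf ∧ v < mv))) →
        InvA (l ++ [v]) mf mv)) := by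
  obtain ⟨hub, hmm, htie, hnil⟩ := h
  have hcv : ((l ++ [v]).count v : Int) = (l.count v : Int) + 1 := by
    simp [List.count_append]
  have hcne : ∀ x : Int, x ≠ v → ((l ++ [v]).count x : Int) = (l.count x : Int) := by
    intro x hx
    have hvx : ¬ v = x := fun h => hx h.symm
    simp [List.count_append, hvx]
  constructor
  · intro hcond
    have hup : mf ≤ (l.count v : Int) + 1 := by
      rcases hcond with h1 | ⟨h2, _⟩ <;> omega
    refine ⟨?_, fun _ => ⟨by simp, by omega⟩, ?_, by simp⟩
    · intro x
      by_cases hx : x = v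
      · subst hx; omega
      · have := hcne x hx
        have := hub x
        omega
    · intro x hx hcx
      by_cases hxv : x = v
      · omega
      · have h1 := hcne x hxv
        have h2 := hub x
        rcases hcond with hgt | ⟨heq, hlt⟩
        · omega
        · have hxl : x ∈ l := by
            rcases List.mem_append.mp hx with h | h
            · exact h
            · simp at h; exact absurd h hxv
          have := htie x hxl (by omega)
          omega
  · intro hcond
    rw [not_or, not_and, not_lt] at hcond
    obtain ⟨hle, hties⟩ := hcond
    have hpos : (0 : Int) ≤ (l.count v : Int) := by positivity
    have hlne : l ≠ [] := by
      intro hl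
      subst hl
      have := hnil rfl
      simp at hle hpos
      omega
    obtain ⟨hmvin, hmvcnt⟩ := hmm hlne
    have hmvne : mv ≠ v := by
      intro he
      rw [he] at hmvcnt
      omega
    refine ⟨?_, fun _ => ⟨by simp [hmvin], by rw [hcne mv hmvne]; omega⟩, ?_, by simp⟩
    · intro x
      by_cases hx : x = v
      · subst hx; omega
      · have := hcne x hx
        have := hub x
        omega
    · intro x hx hcx
      by_cases hxv : x = v
      · subst hxv
        have := hties (by omega)
        omega
      · have h1 := hcne x hxv
        have hxl : x ∈ l := by
          rcases List.mem_append.mp hx with h | h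
          · exact h
          · simp at h; exact absurd h hxv
        exact htie x hxl (by omega)

-- on a nonempty prefix, the invariant determines B's min over the counter keys
theorem minkey_of_inv (l : List Int) (mf mv : Int) (hInv : InvA l mf mv) (hne : l ≠ []) :
    PySem.List.min2? (PySem.Dict.counter l).keys
      (fun x => -((PySem.Dict.counter l).getD x 0)) (fun x => x) = some mv := by
  obtain ⟨hub, hmm, htie, _⟩ := hInv
  obtain ⟨hmvin, hmvcnt⟩ := hmm hne
  apply min2_eq_some
  · rw [PySem.Dict.keys_counter]
    exact (PySem.Set.mem_ofList _ _).mpr hmvin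
  · intro y hy
    have hyl : y ∈ l := by
      rw [PySem.Dict.keys_counter] at hy
      exact (PySem.Set.mem_ofList _ _).mp hy
    simp only [PySem.Dict.getD_counter]
    have h2 := hub y
    by_cases hc : (l.count y : Int) = (l.count mv : Int)
    · exact Or.inr ⟨by omega, htie y hyl (by omega)⟩
    · exact Or.inl (by omega)

theorem fold_agree : ∀ (rest l outA outB : List Int) (mf mv : Int), InvA l mf mv →
    ∃ t, (rest.foldl stepA' (PySem.Dict.counter l, (outA, (mf, mv)))).2.1 = outA ++ t ∧
         (rest.foldl stepB (PySem.Dict.counter l, outB)).2 = outB ++ t := by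
  intro rest
  induction rest with
  | nil =>
      intro l outA outB mf mv _
      exact ⟨[], by simp, by simp⟩
  | cons v rest ih =>
      intro l outA outB mf mv hInv
      have hdict : (PySem.Dict.counter l).modify v 0 (· + 1) = PySem.Dict.counter (l ++ [v]) :=
        (PySem.Dict.counter_append_singleton l v).symm
      have hget : (PySem.Dict.counter (l ++ [v])).getD v 0 = (l.count v : Int) + 1 := by
        rw [PySem.Dict.getD_counter]
        simp [List.count_append]
      obtain ⟨hstep1, hstep2⟩ := invA_step l mf mv v hInv
      by_cases hcond : (l.count v : Int) + 1 > mf ∨ ((l.count v : Int) + 1 = mf ∧ v < mv)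
      all_goals (
        first
        | (have hInv' := hstep1 hcond)
        | (have hInv' := hstep2 hcond))
      -- the value A appends and tracks after this step
      case pos =>
        have hA : stepA' (PySem.Dict.counter l, (outA, (mf, mv))) v =
            (PySem.Dict.counter (l ++ [v]), (outA ++ [v], ((l.count v : Int) + 1, v))) := by
          simp only [stepA', stepA, hdict, hget]
          rw [if_pos hcond]
        have hBval := minkey_of_inv (l ++ [v]) ((l.count v : Int) + 1) v hInv' (by simp)
        have hB : stepB (PySem.Dict.counter l, outB) v =
            (PySem.Dict.counter (l ++ [v]), outB ++ [v]) := by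
          simp only [stepB, hdict, hBval]
          rfl
        obtain ⟨t, h1, h2⟩ := ih (l ++ [v]) (outA ++ [v]) (outB ++ [v]) _ _ hInv'
        refine ⟨v :: t, ?_, ?_⟩
        · rw [List.foldl_cons, hA, h1]
          simp
        · rw [List.foldl_cons, hB, h2]
          simp
      case neg =>
        have hA : stepA' (PySem.Dict.counter l, (outA, (mf, mv))) v =
            (PySem.Dict.counter (l ++ [v]), (outA ++ [mv], (mf, mv))) := by
          simp only [stepA', stepA, hdict, hget]
          rw [if_neg hcond]
        have hBval := minkey_of_inv (l ++ [v]) mf mv hInv' (by simp)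
        have hB : stepB (PySem.Dict.counter l, outB) v =
            (PySem.Dict.counter (l ++ [v]), outB ++ [mv]) := by
          simp only [stepB, hdict, hBval]
          rfl
        obtain ⟨t, h1, h2⟩ := ih (l ++ [v]) (outA ++ [mv]) (outB ++ [mv]) _ _ hInv'
        refine ⟨mv :: t, ?_, ?_⟩
        · rw [List.foldl_cons, hA, h1]
          simp
        · rw [List.foldl_cons, hB, h2]
          simp

-- ===== VERDICT (by name: the statement is the Claim_ definition above) =====
theorem mad_prefix_spec : Claim_equal_mad_prefix := by
  intro arr _
  unfold Spec_mad_prefix mad_prefix mad_prefix_alt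
  rw [foldA_enum]
  have h0 : InvA [] 0 0 := by
    refine ⟨fun x => by simp, by simp, by simp, fun _ => rfl⟩
  obtain ⟨t, hA, hB⟩ := fold_agree arr [] [] [] 0 0 h0
  simp only [PySem.Dict.counter, List.foldl_nil] at hA hB
  rw [hA, hB]
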